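-- pv_equiv track=rewrite | github.com/tahmid-saj/data-structures-algorithms | epi/strings/sinusoidal_string.py | sinusoidalString
-- ===== SOURCE A (Python) =====
-- def sinusoidalString(s):
--     res = []
--     # peaks: loop through s from 1 to len(s) in increments of 4 and append to res
--     # middle: loop through s from 0 to len(s) in increments of 2
--     # troughs: loop through s from 3 to len(s) in increments of 4 and append to res
--     i = 1
--     while i < len(s):
--         res.append(s[i])
--         i += 4
--
--     i = 0
--     while i < len(s):
--         res.append(s[i])
--         i += 2
--
--     i = 3
--     while i < len(s):
--         res.append(s[i])
--         i += 4
--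
--     return "".join(res)
-- ===== SOURCE B (Python) =====
-- def sinusoidalString(s):
--     peaks, middle, troughs = [], [], []
--     for i, ch in enumerate(s):
--         if i % 2 == 0:
--             middle.append(ch)
--         elif i % 4 == 1:
--             peaks.append(ch)
--         else:
--             troughs.append(ch)
--     return "".join(peaks + middle + troughs)
-- ===== Notes on version B (the rewrite author's own statement) =====
-- stated objective: alternative
-- what changed: Replaces A's three separate strided while-loop passes over the string with a single sequential scan that distributes each character into one of three buckets (peaks/middle/troughs) by index modulo, then concatenates the buckets.
import Mathlib
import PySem

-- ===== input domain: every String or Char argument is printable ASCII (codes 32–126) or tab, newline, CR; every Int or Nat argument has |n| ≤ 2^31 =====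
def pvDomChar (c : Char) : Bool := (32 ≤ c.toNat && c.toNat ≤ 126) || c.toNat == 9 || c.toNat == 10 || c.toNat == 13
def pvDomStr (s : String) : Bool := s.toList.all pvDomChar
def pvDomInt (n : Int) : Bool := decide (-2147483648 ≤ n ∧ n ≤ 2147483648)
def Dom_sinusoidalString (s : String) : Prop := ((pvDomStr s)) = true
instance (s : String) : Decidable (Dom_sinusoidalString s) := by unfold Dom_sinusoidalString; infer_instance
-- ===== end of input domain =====

-- B replaces A's three strided passes by one bucket-distributing scan; objective: alternative.

-- ===== PORT A =====
-- `while i < len(s): res.append(s[i]); i += 4`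
def pvStride4 (l : List Char) (i : Nat) : List Char :=
  if h : i < l.length then l[i] :: pvStride4 l (i + 4) else []
termination_by l.length - i
decreasing_by omega

-- `while i < len(s): res.append(s[i]); i += 2`
def pvStride2 (l : List Char) (i : Nat) : List Char :=
  if h : i < l.length then l[i] :: pvStride2 l (i + 2) else []
termination_by l.length - i
decreasing_by omega

def sinusoidalString (s : String) : String :=
  let l := s.toList
  String.ofList (pvStride4 l 1 ++ pvStride2 l 0 ++ pvStride4 l 3)

-- ===== PORT B =====
-- one forward scan of `enumerate(s)` distributing into (peaks, middle, troughs)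
def pvScan (i : Nat) : List Char → List Char × List Char × List Char
  | [] => ([], [], [])
  | c :: r =>
    let (p, m, t) := pvScan (i + 1) r
    if i % 2 = 0 then (p, c :: m, t)
    else if i % 4 = 1 then (c :: p, m, t)
    else (p, m, c :: t)

def sinusoidalString_alt (s : String) : String :=
  let (p, m, t) := pvScan 0 s.toList
  String.ofList (p ++ m ++ t)

-- ===== PRECONDITION & SPEC =====
def Spec_sinusoidalString (s : String) (out : String) : Prop := out = sinusoidalString_alt s
instance (s : String) (out : String) : Decidable (Spec_sinusoidalString s out) := by unfold Spec_sinusoidalString; infer_instance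

-- ===== CLAIM (what is proved, stated in full; the proofs are below) =====
def Claim_equal_sinusoidalString : Prop := ∀ (s : String), Dom_sinusoidalString s → Spec_sinusoidalString s (sinusoidalString s)

-- ===== LEMMAS AND PROOFS =====

-- "take head, then skip 3" view of a stride-4 pass, as a structural recursion
def pvSkip3 : List Char → List Char
  | [] => []
  | c :: r => c :: pvSkip3 (r.drop 3)
termination_by l => l.length
decreasing_by simp

-- "take head, then skip 1" view of a stride-2 pass
def pvSkip1 : List Char → List Char
  | [] => []
  | c :: r => c :: pvSkip1 (r.drop 1)
termination_by l => l.length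
decreasing_by simp

theorem pvStride4_eq_skip (l : List Char) (i : Nat) : pvStride4 l i = pvSkip3 (l.drop i) := by
  unfold pvStride4
  split
  · next h =>
    rw [List.drop_eq_getElem_cons h]
    simp only [pvSkip3, List.drop_drop]
    rw [show i + 1 + 3 = i + 4 by omega, pvStride4_eq_skip l (i + 4)]
  · next h =>
    rw [List.drop_eq_nil_of_le (by omega)]
    simp [pvSkip3]
termination_by l.length - i
decreasing_by omega

theorem pvStride2_eq_skip (l : List Char) (i : Nat) : pvStride2 l i = pvSkip1 (l.drop i) := by
  unfold pvStride2
  split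
  · next h =>
    rw [List.drop_eq_getElem_cons h]
    simp only [pvSkip1, List.drop_drop]
    rw [show i + 1 + 1 = i + 2 by omega, pvStride2_eq_skip l (i + 2)]
  · next h =>
    rw [List.drop_eq_nil_of_le (by omega)]
    simp [pvSkip1]
termination_by l.length - i
decreasing_by omega

theorem pvScan_period (l : List Char) : ∀ i, pvScan (i + 4) l = pvScan i l := by
  induction l with
  | nil => intro i; rfl
  | cons c r ih =>
    intro i
    have h2 : (i + 4) % 2 = i % 2 := by omega
    have h4 : (i + 4) % 4 = i % 4 := by omega
    simp only [pvScan, h2, h4]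
    rw [show i + 4 + 1 = i + 1 + 4 by omega, ih (i + 1)]

theorem pvScan_eq_strides : ∀ (n : Nat) (l : List Char), l.length ≤ n →
    pvScan 0 l = (pvSkip3 (l.drop 1), pvSkip1 l, pvSkip3 (l.drop 3)) := by
  intro n
  induction n using Nat.strong_induction_on with
  | _ n ih =>
    intro l hn
    match l with
    | [] => simp [pvScan, pvSkip3, pvSkip1]
    | [a] => simp [pvScan, pvSkip3, pvSkip1]
    | [a, b] => simp [pvScan, pvSkip3, pvSkip1]
    | [a, b, c] => simp [pvScan, pvSkip3, pvSkip1]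
    | a :: b :: c :: d :: r =>
      have hr : r.length ≤ n - 4 := by simp at hn; omega
      have hn4 : n - 4 < n := by simp at hn; omega
      have ihr := ih (n - 4) hn4 r hr
      simp only [pvScan, List.drop]
      rw [show (0:Nat) + 1 + 1 + 1 = 3 by rfl, show (3:Nat) + 1 = 0 + 4 by rfl, pvScan_period r 0, ihr]
      simp [pvSkip3, pvSkip1]

theorem sinusoidalString_eq (s : String) : sinusoidalString s = sinusoidalString_alt s := by
  simp only [sinusoidalString, sinusoidalString_alt,
    pvScan_eq_strides s.toList.length s.toList le_rfl,
    pvStride4_eq_skip, pvStride2_eq_skip, List.drop_zero]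

-- ===== VERDICT (by name: the statement is the Claim_ definition above) =====
theorem sinusoidalString_spec : Claim_equal_sinusoidalString := by
  intro s _
  unfold Spec_sinusoidalString
  exact sinusoidalString_eq s
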